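-- pv_equiv track=rewrite | github.com/vadimfedulov035/ludoviko-server | proc.py | _fix_sentences
-- ===== SOURCE A (Python) =====
-- def _fix_sentences(text):
--     if text:
--         text = text[0].upper() + text[1:]
--
--     last_index = max(
--         (text.rfind(char) for char in '.!?'),
--         default=-1
--     )
--     if last_index != -1 and last_index > 10:
--         text = text[:last_index + 1]
--
--     return text
-- ===== SOURCE B (Python) =====
-- def _fix_sentences(text):
--     if text:
--         text = text[0].upper() + text[1:]
--     n = len(text)
--     while n > 0 and text[n - 1] not in '.!?':
--         n -= 1
--     return text[:n] if n > 11 else text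
-- ===== Notes on version B (the rewrite author's own statement) =====
-- stated objective: alternative
-- what changed: Replaces the three full backward rfind scans combined via max() and the index-based guard with a single early-exit backward while-loop that strips the trailing punctuation-free suffix, maintaining the kept length n and comparing n > 11 instead of last_index > 10.
import Mathlib
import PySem

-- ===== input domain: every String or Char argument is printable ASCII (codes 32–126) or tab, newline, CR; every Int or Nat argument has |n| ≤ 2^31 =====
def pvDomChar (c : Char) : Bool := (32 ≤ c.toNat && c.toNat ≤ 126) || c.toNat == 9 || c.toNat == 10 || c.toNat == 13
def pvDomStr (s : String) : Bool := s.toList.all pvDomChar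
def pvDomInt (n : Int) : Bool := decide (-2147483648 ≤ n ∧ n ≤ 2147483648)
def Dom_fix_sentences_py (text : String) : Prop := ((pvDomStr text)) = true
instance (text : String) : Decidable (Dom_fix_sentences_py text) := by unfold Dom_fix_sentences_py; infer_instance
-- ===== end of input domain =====

-- B replaces A's three full backward rfind scans + max() with one early-exit backward
-- while-loop stripping the trailing punctuation-free suffix (alternative decomposition).

-- ===== PORT A =====
-- literal port of A: capitalize first char, max of three rfinds, conditional truncation
def fix_sentences_py (text : String) : String :=
  let l := text.toList
  let l := if l.isEmpty then l
           else PySem.Chars.upper (PySem.List.slice l (some 0) (some 1)) ++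
                PySem.List.slice l (some 1) none
  let lastIndex := max (max (PySem.Chars.rfind l ['.']) (PySem.Chars.rfind l ['!']))
                       (PySem.Chars.rfind l ['?'])
  let l := if lastIndex ≠ -1 ∧ lastIndex > 10 then PySem.List.slice l none (some (lastIndex + 1))
           else l
  String.ofList l

-- ===== PORT B =====
-- B's while-loop 'while n > 0 and text[n-1] not in ".!?": n -= 1', as recursion on n;
-- text[n-1] is always in range here, ported as getD
def pvStripB (l : List Char) : Nat → Nat
  | 0 => 0
  | n + 1 =>
    if l.getD n ' ' = '.' ∨ l.getD n ' ' = '!' ∨ l.getD n ' ' = '?' then n + 1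
    else pvStripB l n

-- literal port of B: capitalize first char, early-exit backward strip loop, keep prefix if n > 11
def fix_sentences_py_alt (text : String) : String :=
  let l := text.toList
  let l := if l.isEmpty then l
           else PySem.Chars.upper (PySem.List.slice l (some 0) (some 1)) ++
                PySem.List.slice l (some 1) none
  let n := pvStripB l l.length
  if (n : Int) > 11 then String.ofList (PySem.List.slice l none (some (n : Int)))
  else String.ofList l

-- ===== PRECONDITION & SPEC =====
def Spec_fix_sentences_py (text : String) (out : String) : Prop := out = fix_sentences_py_alt text
instance (text : String) (out : String) : Decidable (Spec_fix_sentences_py text out) := by unfold Spec_fix_sentences_py; infer_instance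

-- ===== CLAIM =====
def Claim_equal_fix_sentences_py : Prop := ∀ (text : String), Dom_fix_sentences_py text → Spec_fix_sentences_py text (fix_sentences_py text)

-- ===== LEMMAS AND PROOFS =====

theorem pvGo_zero (s sub : List Char) :
    PySem.Chars.rfind.go s sub 0 = if sub.isPrefixOf s then 0 else -1 := by
  simp only [PySem.Chars.rfind.go]

theorem pvGo_succ (s sub : List Char) (j : Nat) :
    PySem.Chars.rfind.go s sub (j + 1) =
      if sub.isPrefixOf (List.drop (j + 1) s) then ((j : Int) + 1)
      else PySem.Chars.rfind.go s sub j := by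
  simp only [PySem.Chars.rfind.go]
  push_cast
  rfl

theorem pvRfind_le (l sub : List Char) (j : Nat) : PySem.Chars.rfind.go l sub j ≤ j := by
  induction j with
  | zero => rw [pvGo_zero]; split <;> simp
  | succ j ih =>
    rw [pvGo_succ]
    split
    · simp
    · exact le_trans ih (by push_cast; omega)

theorem pvGo_append (l : List Char) (c x : Char) (j : Nat) (hj : j < l.length) :
    PySem.Chars.rfind.go (l ++ [c]) [x] j = PySem.Chars.rfind.go l [x] j := by
  induction j with
  | zero =>
    cases l with
    | nil => simp at hj
    | cons a t => simp [PySem.Chars.rfind.go, List.isPrefixOf]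
  | succ j ih =>
    have h1 : j + 1 < l.length := hj
    have hdrop : List.drop (j+1) (l ++ [c]) = List.drop (j+1) l ++ [c] :=
      List.drop_append_of_le_length (by omega)
    have hne : List.drop (j+1) l ≠ [] := by
      intro h
      have := List.length_drop (l := l) (i := j+1)
      rw [h] at this; simp at this; omega
    simp only [PySem.Chars.rfind.go, hdrop]
    obtain ⟨a, t, hat⟩ := List.exists_cons_of_ne_nil hne
    rw [hat]
    simp [List.isPrefixOf, ih (by omega)]

theorem pvRfind_append (l : List Char) (c x : Char) :
    PySem.Chars.rfind (l ++ [c]) [x] =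
      if c = x then (l.length : Int) else PySem.Chars.rfind l [x] := by
  unfold PySem.Chars.rfind
  have hlen : (l ++ [c]).length = l.length + 1 := by simp
  rw [hlen, pvGo_succ]
  have hdrop1 : List.drop (l.length + 1) (l ++ [c]) = [] := by
    apply List.drop_eq_nil_of_le; simp
  rw [hdrop1]
  simp only [List.isPrefixOf, Bool.false_eq_true, if_false]
  cases l with
  | nil =>
    simp only [List.length_nil, List.nil_append]
    rw [pvGo_zero, pvGo_zero]
    simp only [List.nil_append, List.isPrefixOf, List.isPrefixOf_nil_left, Bool.and_true]
    by_cases hc : c = x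
    · subst hc; simp
    · simp [beq_iff_eq, Ne.symm hc, hc]
  | cons a t =>
    have hL : (a :: t).length = t.length + 1 := by simp
    rw [hL, pvGo_succ, pvGo_succ]
    have hd1 : List.drop (t.length + 1) (a :: t ++ [c]) = [c] := by
      rw [show a :: t ++ [c] = (a :: t) ++ [c] from rfl,
        List.drop_append_of_le_length (by simp)]
      simp
    have hd2 : List.drop (t.length + 1) (a :: t) = [] := by
      apply List.drop_eq_nil_of_le; simp
    rw [hd1, hd2]
    simp only [List.isPrefixOf, List.isPrefixOf_nil_left, Bool.and_true, Bool.false_eq_true,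
      if_false]
    by_cases hc : c = x
    · subst hc; simp
    · have hxc : (x == c) = false := by simp [Ne.symm hc]
      rw [hxc]
      simp only [Bool.false_eq_true, if_false, if_neg hc]
      exact pvGo_append (a :: t) c x t.length (by simp)

-- the strip loop ignores an appended element it never reaches
theorem pvStripB_append (l : List Char) (c : Char) (n : Nat) (hn : n ≤ l.length) :
    pvStripB (l ++ [c]) n = pvStripB l n := by
  induction n with
  | zero => rfl
  | succ n ih =>
    have hget : (l ++ [c]).getD n ' ' = l.getD n ' ' := by
      have h : n < l.length := hn
      simp [List.getD, List.getElem?_append_left h]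
    simp only [pvStripB, hget, ih (by omega)]

-- A's max-of-three-rfinds is B's kept length minus one
theorem pvMax3_strip (l : List Char) :
    max (max (PySem.Chars.rfind l ['.']) (PySem.Chars.rfind l ['!']))
        (PySem.Chars.rfind l ['?']) = (pvStripB l l.length : Int) - 1 := by
  induction l using List.reverseRecOn with
  | nil => simp [PySem.Chars.rfind, pvGo_zero, pvStripB]
  | append_singleton l c ih =>
    have h1 : PySem.Chars.rfind l ['.'] ≤ (l.length : Int) := pvRfind_le l ['.'] l.length
    have h2 : PySem.Chars.rfind l ['!'] ≤ (l.length : Int) := pvRfind_le l ['!'] l.length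
    have h3 : PySem.Chars.rfind l ['?'] ≤ (l.length : Int) := pvRfind_le l ['?'] l.length
    have hlen : (l ++ [c]).length = l.length + 1 := by simp
    have hget : (l ++ [c]).getD l.length ' ' = c := by
      simp [List.getD, List.getElem?_append_right (le_refl l.length)]
    rw [hlen, pvRfind_append, pvRfind_append, pvRfind_append]
    simp only [pvStripB, hget]
    by_cases h : c = '.' ∨ c = '!' ∨ c = '?'
    · rw [if_pos h]
      rcases h with h | h | h <;> subst h <;>
        simp [max_def] <;> split_ifs <;> simp_all <;> omega
    · push_neg at h
      obtain ⟨hp1, hp2, hp3⟩ := h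
      rw [if_neg hp1, if_neg hp2, if_neg hp3, if_neg (by tauto),
        pvStripB_append l c l.length (le_refl _)]
      exact ih

-- ===== VERDICT =====
theorem fix_sentences_py_spec : Claim_equal_fix_sentences_py := by
  intro text _
  unfold Spec_fix_sentences_py fix_sentences_py fix_sentences_py_alt
  dsimp only []
  set l := (if (text.toList).isEmpty then text.toList
            else PySem.Chars.upper (PySem.List.slice text.toList (some 0) (some 1)) ++
                 PySem.List.slice text.toList (some 1) none) with hl
  rw [pvMax3_strip]
  set n := pvStripB l l.length with hn
  by_cases hgt : (n : Int) > 11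
  · rw [if_pos ⟨by omega, by omega⟩, if_pos hgt,
      show (n : Int) - 1 + 1 = (n : Int) by omega]
  · rw [if_neg (by omega), if_neg hgt]
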